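-- pv_equiv track=rewrite | github.com/iddv/mcp-forge | template_system/handlers/__init__.py | get_handlers_for_capabilities
-- ===== SOURCE A (Python) =====
-- from typing import Dict, Any, List, Callable, Optional
--
-- capability_handler_map = {
--     "file_operations": "file_reader",
--     "http_requests": "http_request",
--     "database_access": "database",
--     "claude": "claude",
-- }
--
-- def get_handlers_for_capabilities(capabilities: List[str]) -> List[str]:
--     """
--     Get required handlers for a set of capabilities.
--
--     Args:
--         capabilities: List of capability names
--
--     Returns:
--         List of handler names needed for the capabilities
--     """
--     required_handlers = []
--
--     for capability in capabilities:
--         if capability in capability_handler_map: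
--             handler = capability_handler_map[capability]
--             if handler not in required_handlers:
--                 required_handlers.append(handler)
--
--     return required_handlers
-- ===== SOURCE B (Python) =====
-- from typing import Dict, Any, List, Callable, Optional
--
-- capability_handler_map = {
--     "file_operations": "file_reader",
--     "http_requests": "http_request",
--     "database_access": "database",
--     "claude": "claude",
-- }
--
-- def get_handlers_for_capabilities(capabilities: List[str]) -> List[str]:
--     # Build the result back-to-front: walk the capabilities in reverse,
--     # prepend each mapped handler and drop any later duplicate of it by
--     # filtering the partial result (no membership test, no append).
--     result = []
--     for capability in reversed(capabilities):
--         if capability in capability_handler_map: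
--             h = capability_handler_map[capability]
--             result = [h] + [x for x in result if x != h]
--     return result
-- ===== Notes on version B (the rewrite author's own statement) =====
-- stated objective: alternative
-- what changed: B builds the result back-to-front: it walks the capabilities in reverse and, for each mapped handler, prepends it and deletes its later duplicates by filtering the partial result, instead of A's forward loop that appends guarded by a 'not in' membership test.
import Mathlib
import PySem

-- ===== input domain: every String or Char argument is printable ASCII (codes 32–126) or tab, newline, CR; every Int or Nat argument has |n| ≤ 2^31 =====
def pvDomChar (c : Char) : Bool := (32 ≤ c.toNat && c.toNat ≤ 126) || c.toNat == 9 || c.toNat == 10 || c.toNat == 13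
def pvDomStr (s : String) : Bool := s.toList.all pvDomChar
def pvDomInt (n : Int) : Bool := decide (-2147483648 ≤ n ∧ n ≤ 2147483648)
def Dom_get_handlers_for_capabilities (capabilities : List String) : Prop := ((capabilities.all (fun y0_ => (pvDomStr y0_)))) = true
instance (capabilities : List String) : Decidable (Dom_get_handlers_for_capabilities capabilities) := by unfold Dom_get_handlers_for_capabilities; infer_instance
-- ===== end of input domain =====

-- B builds the result back-to-front (reverse walk, prepend + filter out later duplicates)
-- instead of A's forward append-with-membership-test loop; objective: alternative.


-- ===== PORT A =====
def capability_handler_map : PySem.Dict String String :=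
  PySem.Dict.ofList [("file_operations", "file_reader"), ("http_requests", "http_request"),
                     ("database_access", "database"), ("claude", "claude")]

def get_handlers_for_capabilities (capabilities : List String) : List String :=
  capabilities.foldl (fun required_handlers capability =>
    match capability_handler_map.get? capability with
    | some handler =>
        if required_handlers.contains handler then required_handlers
        else required_handlers ++ [handler]
    | none => required_handlers) []

-- ===== PORT B =====
-- Python's `for capability in reversed(capabilities)` with a prepend-and-filter
-- accumulator is exactly a right fold over the list.
def get_handlers_for_capabilities_alt (capabilities : List String) : List String :=
  capabilities.foldr (fun capability result =>
    match capability_handler_map.get? capability with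
    | some h => h :: result.filter (fun x => x != h)
    | none => result) []

-- ===== PRECONDITION & SPEC =====
def Spec_get_handlers_for_capabilities (capabilities : List String) (out : List String) : Prop := out = get_handlers_for_capabilities_alt capabilities
instance (capabilities : List String) (out : List String) : Decidable (Spec_get_handlers_for_capabilities capabilities out) := by unfold Spec_get_handlers_for_capabilities; infer_instance

-- ===== CLAIM (what is proved, stated in full; the proofs are below) =====
def Claim_equal_get_handlers_for_capabilities : Prop := ∀ (capabilities : List String), Dom_get_handlers_for_capabilities capabilities → Spec_get_handlers_for_capabilities capabilities (get_handlers_for_capabilities capabilities)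

-- ===== LEMMAS AND PROOFS =====

-- A's forward fold from accumulator `acc` returns `acc` extended with B's answer
-- purged of the elements already in `acc`.
theorem foldl_eq_alt_filter (caps : List String) (acc : List String) :
    caps.foldl (fun required_handlers capability =>
      match capability_handler_map.get? capability with
      | some handler =>
          if required_handlers.contains handler then required_handlers
          else required_handlers ++ [handler]
      | none => required_handlers) acc
    = acc ++ (get_handlers_for_capabilities_alt caps).filter (fun x => !acc.contains x) := by
  induction caps generalizing acc with
  | nil => simp [get_handlers_for_capabilities_alt]
  | cons c cs ih =>
    simp only [get_handlers_for_capabilities_alt, List.foldr_cons, List.foldl_cons] at *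
    cases hc : capability_handler_map.get? c with
    | none => exact ih acc
    | some h =>
      by_cases hmem : h ∈ acc
      · have hct : acc.contains h = true := by simpa using hmem
        simp only [hct, if_pos, ih, List.filter_cons, Bool.not_true,
          Bool.false_eq_true, if_false]
        congr 1
        rw [List.filter_filter]
        apply List.filter_congr
        intro x _
        by_cases hx : x ∈ acc
        · simp [hx]
        · have hxh : (x != h) = true := by
            simp only [bne_iff_ne, ne_eq]
            intro e; exact hx (e ▸ hmem)
          simp [hx, hxh]
      · have hct : acc.contains h = false := by simpa using hmem
        simp only [hct, ih, List.filter_cons, Bool.not_false,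
          Bool.false_eq_true, if_false, if_true]
        rw [List.append_assoc]
        congr 1
        simp only [List.cons_append, List.nil_append]
        congr 1
        rw [List.filter_filter]
        apply List.filter_congr
        intro x _
        simp [Bool.not_or, Bool.and_comm, bne, beq_eq_decide]

-- ===== VERDICT (by name: the statement is the Claim_ definition above) =====
theorem get_handlers_for_capabilities_spec : Claim_equal_get_handlers_for_capabilities := by
  intro capabilities _
  show _ = _
  rw [get_handlers_for_capabilities, foldl_eq_alt_filter]
  simp
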